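-- pv_equiv track=rewrite | github.com/pedrinhosek/DocuClient | cliente/utils/validates.py | cnpj_verification
-- ===== SOURCE A (Python) =====
-- def cnpj_verification(cnpj):
--     cnpj = ''.join(filter(str.isdigit, cnpj))  # Remove caracteres não numéricos
--     if len(cnpj) != 14:
--         return False
--
--     # Calcula o primeiro dígito verificador
--     soma = 0
--     peso = 5
--     for i in range(12):
--         soma += int(cnpj[i]) * peso
--         peso -= 1
--         if peso < 2:
--             peso = 9
--     resto = soma % 11
--     if resto < 2:
--         digito1 = 0
--     else:
--         digito1 = 11 - resto
--
--     # Calcula o segundo dígito verificador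
--     soma = 0
--     peso = 6
--     for i in range(13):
--         soma += int(cnpj[i]) * peso
--         peso -= 1
--         if peso < 2:
--             peso = 9
--     resto = soma % 11
--     if resto < 2:
--         digito2 = 0
--     else:
--         digito2 = 11 - resto
--
--     return not cnpj[-2:] == f"{digito1}{digito2}"
-- ===== SOURCE B (Python) =====
-- def _weight(i):
--     # weight of position i in the 13-digit DV2 scheme; DV1 uses the same
--     # table shifted by one (weight of digit i is _weight(i + 1)).
--     return 6 - i if i < 5 else 9 - (i - 5) % 8
--
--
-- def cnpj_verification(cnpj):
--     ds = [ord(c) - 48 for c in cnpj if '0' <= c <= '9']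
--     if len(ds) != 14:
--         return False
--     s1 = s2 = 0
--     for i, d in enumerate(ds[:13]):
--         if i < 12:
--             s1 += d * _weight(i + 1)
--         s2 += d * _weight(i)
--     dv = lambda s: 0 if s % 11 < 2 else 11 - s % 11
--     return not (ds[12] == dv(s1) and ds[13] == dv(s2))
-- ===== Notes on version B (the rewrite author's own statement) =====
-- stated objective: alternative
-- what changed: Replaces A's two staged index loops with a mutable wrapping weight counter and a string-format comparison by one fused pass over the numeric digit list that accumulates both check sums at once using an arithmetic weight formula (6-i for i<5 else 9-(i-5)%8), then compares the last two digit VALUES numerically instead of formatting the digits into a string.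
import Mathlib
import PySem

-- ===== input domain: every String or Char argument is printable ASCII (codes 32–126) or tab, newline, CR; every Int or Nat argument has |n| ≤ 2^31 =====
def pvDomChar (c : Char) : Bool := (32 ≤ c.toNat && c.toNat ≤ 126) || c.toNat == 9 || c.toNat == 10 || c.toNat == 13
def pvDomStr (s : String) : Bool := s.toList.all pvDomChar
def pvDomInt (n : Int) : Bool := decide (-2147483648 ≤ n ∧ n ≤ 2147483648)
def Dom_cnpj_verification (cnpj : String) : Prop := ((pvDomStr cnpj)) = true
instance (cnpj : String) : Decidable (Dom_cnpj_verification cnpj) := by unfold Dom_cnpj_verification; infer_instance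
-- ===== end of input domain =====

-- B fuses A's two staged weight-counter loops into one pass over the numeric digit
-- list, accumulating both check sums with an arithmetic weight formula, and compares
-- the last two digit values numerically instead of via string formatting; same return
-- value, including A's inverted final comparison (objective: alternative).

-- int(c) for a single digit character (exact: on Dom the filtered characters are '0'..'9')
def pvDigit (c : Char) : Int := (c.toNat : Int) - 48

-- ===== PORT A =====
def cnpj_verification (cnpj : String) : Bool :=
  -- str.isdigit filter: on printable-ASCII Dom, str.isdigit is exactly Char.isDigit
  let ds : List Char := cnpj.toList.filter Char.isDigit
  if ds.length ≠ 14 then false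
  else
    -- first loop: for i in range(12), state (soma, peso); index always in range, default unused
    let s1 : Int × Int := (PySem.List.pyRange 0 12 1).foldl
      (fun (sp : Int × Int) i =>
        let soma := sp.1 + pvDigit (PySem.List.pyGetD ds i ' ') * sp.2
        let peso := sp.2 - 1
        (soma, if peso < 2 then 9 else peso)) (0, 5)
    let resto1 := PySem.Int.mod s1.1 11
    let digito1 : Int := if resto1 < 2 then 0 else 11 - resto1
    -- second loop: for i in range(13)
    let s2 : Int × Int := (PySem.List.pyRange 0 13 1).foldl
      (fun (sp : Int × Int) i =>
        let soma := sp.1 + pvDigit (PySem.List.pyGetD ds i ' ') * sp.2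
        let peso := sp.2 - 1
        (soma, if peso < 2 then 9 else peso)) (0, 6)
    let resto2 := PySem.Int.mod s2.1 11
    let digito2 : Int := if resto2 < 2 then 0 else 11 - resto2
    -- return not cnpj[-2:] == f"{digito1}{digito2}"
    !(PySem.List.slice ds (some (-2)) none
        == PySem.Int.toChars digito1 ++ PySem.Int.toChars digito2)

-- ===== PORT B =====
-- _weight(i) = 6 - i if i < 5 else 9 - (i - 5) % 8
def pvWeight (i : Int) : Int := if i < 5 then 6 - i else 9 - PySem.Int.mod (i - 5) 8

def cnpj_verification_alt (cnpj : String) : Bool :=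
  -- ds = [ord(c) - 48 for c in cnpj if '0' <= c <= '9']
  let ds : List Int := (cnpj.toList.filter (fun c => '0' ≤ c && c ≤ '9')).map
    (fun c => (c.toNat : Int) - 48)
  if ds.length ≠ 14 then false
  else
    -- one fused pass: for i, d in enumerate(ds[:13])
    let s : Int × Int := (PySem.List.enumerate (PySem.List.slice ds none (some 13))).foldl
      (fun (s : Int × Int) (p : Int × Int) =>
        (if p.1 < 12 then s.1 + p.2 * pvWeight (p.1 + 1) else s.1,
         s.2 + p.2 * pvWeight p.1)) (0, 0)
    let dv : Int → Int := fun t => if PySem.Int.mod t 11 < 2 then 0 else 11 - PySem.Int.mod t 11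
    -- return not (ds[12] == dv(s1) and ds[13] == dv(s2))
    !(decide (PySem.List.pyGetD ds 12 0 = dv s.1) && decide (PySem.List.pyGetD ds 13 0 = dv s.2))

-- ===== PRECONDITION & SPEC =====
def Spec_cnpj_verification (cnpj : String) (out : Bool) : Prop := out = cnpj_verification_alt cnpj
instance (cnpj : String) (out : Bool) : Decidable (Spec_cnpj_verification cnpj out) := by unfold Spec_cnpj_verification; infer_instance

-- ===== CLAIM (what is proved, stated in full; the proofs are below) =====
def Claim_equal_cnpj_verification : Prop := ∀ (cnpj : String), Dom_cnpj_verification cnpj → Spec_cnpj_verification cnpj (cnpj_verification cnpj)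

-- ===== LEMMAS AND PROOFS =====

-- a list of length 14 is fourteen explicit cons cells
theorem pv_len14 {α : Type} (l : List α) (h : l.length = 14) :
    ∃ a b c d e f g h' i j k m n o : α, l = [a,b,c,d,e,f,g,h',i,j,k,m,n,o] := by
  match l, h with
  | [a,b,c,d,e,f,g,h',i,j,k,m,n,o], _ =>
    exact ⟨a,b,c,d,e,f,g,h',i,j,k,m,n,o, rfl⟩


theorem pv_toChars_digit (d : Int) (h0 : 0 ≤ d) (h9 : d ≤ 9) :
    PySem.Int.toChars d = [Char.ofNat (48 + d.toNat)] := by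
  interval_cases d <;> decide

theorem pv_char_beq (c : Char) (hc : c.isDigit = true) (d : Int) (h0 : 0 ≤ d) (h9 : d ≤ 9) :
    (c == Char.ofNat (48 + d.toNat)) = decide ((c.toNat : Int) - 48 = d) := by
  simp [Char.isDigit] at hc
  have hb : 48 ≤ c.toNat ∧ c.toNat ≤ 57 :=
    ⟨UInt32.le_iff_toNat_le.mp hc.1, UInt32.le_iff_toNat_le.mp hc.2⟩
  have hv : (Char.ofNat (48 + d.toNat)).toNat = 48 + d.toNat := by
    have : d.toNat ≤ 9 := by omega
    interval_cases d <;> decide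
  by_cases h : (c.toNat : Int) - 48 = d
  · have hct : c.toNat = 48 + d.toNat := by omega
    have he : c = Char.ofNat (48 + d.toNat) := by rw [← hct, Char.ofNat_toNat]
    rw [he, beq_self_eq_true, hv]
    exact (decide_eq_true (by omega : ((48 + d.toNat : Nat) : Int) - 48 = d)).symm
  · have hne : c ≠ Char.ofNat (48 + d.toNat) := by
      intro he
      apply h
      have := congrArg Char.toNat he
      rw [hv] at this
      omega
    simp [hne, h]

theorem pv_dv_bounds (t : Int) :
    0 ≤ (if t.fmod 11 ≤ 1 then (0:Int) else 11 - t.fmod 11) ∧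
      (if t.fmod 11 ≤ 1 then (0:Int) else 11 - t.fmod 11) ≤ 9 := by
  have he : t.fmod 11 = t % 11 := by rw [Int.fmod_eq_emod]; simp
  have h1 : 0 ≤ t % 11 := Int.emod_nonneg t (by norm_num)
  have h2 : t % 11 < 11 := Int.emod_lt_of_pos t (by norm_num)
  rw [he]; split_ifs <;> omega

theorem pv_tail_cmp (x y : Char) (hx : x.isDigit = true) (hy : y.isDigit = true)
    (d1 d2 : Int) (h1 : 0 ≤ d1 ∧ d1 ≤ 9) (h2 : 0 ≤ d2 ∧ d2 ≤ 9) :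
    ([x, y] == PySem.Int.toChars d1 ++ PySem.Int.toChars d2) =
      (decide ((x.toNat : Int) - 48 = d1) && decide ((y.toNat : Int) - 48 = d2)) := by
  rw [pv_toChars_digit d1 h1.1 h1.2, pv_toChars_digit d2 h2.1 h2.2]
  rw [← pv_char_beq x hx d1 h1.1 h1.2, ← pv_char_beq y hy d2 h2.1 h2.2]
  simp

-- ===== VERDICT (by name: the statement is the Claim_ definition above) =====
theorem cnpj_verification_spec : Claim_equal_cnpj_verification := by
  intro s _
  unfold Spec_cnpj_verification cnpj_verification cnpj_verification_alt
  have hfe : (s.toList.filter (fun c => '0' ≤ c && c ≤ '9')) = s.toList.filter Char.isDigit := rfl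
  rw [hfe]
  generalize hds : s.toList.filter Char.isDigit = ds
  by_cases h : ds.length = 14
  · obtain ⟨a,b,c,d,e,f,g,h',i,j,k,m,n,o,rfl⟩ := pv_len14 ds h
    have hn : n.isDigit = true := List.of_mem_filter (l := s.toList) (by rw [hds]; simp)
    have ho : o.isDigit = true := List.of_mem_filter (l := s.toList) (by rw [hds]; simp)
    simp [pvDigit, pvWeight, PySem.List.pyRange_one, List.range_succ, PySem.List.pyGetD_ofNat',
      PySem.List.slice, PySem.List.clampIdx, PySem.List.enumerate, PySem.Int.mod]
    rw [pv_tail_cmp n o hn ho _ _ (pv_dv_bounds _) (pv_dv_bounds _)]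
  · simp [h]
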